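-- pv_equiv track=rewrite | github.com/lucia122hk/fraud-text-annotator | web_app/backend/app.py | generate_timeline_label
-- ===== SOURCE A (Python) =====
-- def generate_timeline_label(glr_results):
--     """时序标签打标"""
--     if not glr_results:
--         return "无欺诈"
--
--     g_count = sum(1 for label, value in glr_results.items() if (label.startswith('G1:') or label.startswith('G2:') or label.startswith('G3:')) and value == 1)
--     l_count = sum(1 for label, value in glr_results.items() if (label.startswith('L1:') or label.startswith('L2:') or label.startswith('L3:')) and value == 1)
--     r_count = sum(1 for label, value in glr_results.items() if (label.startswith('R1:') or label.startswith('R2:') or label.startswith('R3:')) and value == 1)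
--
--     total_glr = g_count + l_count + r_count
--
--     if total_glr >= 2:
--         if g_count > 0 and l_count > 0 and r_count > 0:
--             return "GLR复合型欺诈"
--         elif g_count > 0 and l_count > 0:
--             return "GL复合型欺诈"
--         elif g_count > 0 and r_count > 0:
--             return "GR复合型欺诈"
--         elif l_count > 0 and r_count > 0:
--             return "LR复合型欺诈"
--         else:
--             return "单一类别多子项欺诈"
--     elif total_glr == 1:
--         if g_count == 1:
--             return "G类单一型欺诈"
--         elif l_count == 1:
--             return "L类单一型欺诈"
--         elif r_count == 1:
--             return "R类单一型欺诈"
--         else: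
--             return "单一型欺诈"
--     else:
--         return "无欺诈"
-- ===== SOURCE B (Python) =====
-- def generate_timeline_label(glr_results):
--     """时序标签打标"""
--     if not glr_results:
--         return "无欺诈"
--
--     g_count = l_count = r_count = 0
--     for label, value in glr_results.items():
--         if value == 1 and len(label) >= 3 and label[1] in '123' and label[2] == ':':
--             c = label[0]
--             if c == 'G':
--                 g_count += 1
--             elif c == 'L':
--                 l_count += 1
--             elif c == 'R':
--                 r_count += 1
--
--     total_glr = g_count + l_count + r_count
--
--     if total_glr >= 2:
--         if g_count > 0 and l_count > 0 and r_count > 0: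
--             return "GLR复合型欺诈"
--         elif g_count > 0 and l_count > 0:
--             return "GL复合型欺诈"
--         elif g_count > 0 and r_count > 0:
--             return "GR复合型欺诈"
--         elif l_count > 0 and r_count > 0:
--             return "LR复合型欺诈"
--         else:
--             return "单一类别多子项欺诈"
--     elif total_glr == 1:
--         if g_count == 1:
--             return "G类单一型欺诈"
--         elif l_count == 1:
--             return "L类单一型欺诈"
--         elif r_count == 1:
--             return "R类单一型欺诈"
--         else:
--             return "单一型欺诈"
--     else:
--         return "无欺诈"
-- ===== Notes on version B (the rewrite author's own statement) =====
-- stated objective: faster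
-- what changed: Replaces three separate full scans (one generator-sum per category, each testing three startswith prefixes) with a single pass that classifies each entry by its first three characters and increments one of three counters.
import Mathlib
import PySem

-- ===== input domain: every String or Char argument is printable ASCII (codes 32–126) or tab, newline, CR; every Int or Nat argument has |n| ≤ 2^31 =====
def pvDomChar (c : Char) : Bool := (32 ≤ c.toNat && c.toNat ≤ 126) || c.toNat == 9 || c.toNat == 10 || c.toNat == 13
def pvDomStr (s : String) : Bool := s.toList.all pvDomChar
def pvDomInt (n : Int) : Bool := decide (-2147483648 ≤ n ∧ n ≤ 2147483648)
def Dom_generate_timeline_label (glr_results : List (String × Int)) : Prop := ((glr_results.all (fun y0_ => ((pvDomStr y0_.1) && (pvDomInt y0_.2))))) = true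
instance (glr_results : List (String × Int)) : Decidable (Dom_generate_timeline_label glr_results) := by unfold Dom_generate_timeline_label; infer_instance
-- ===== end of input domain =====

-- B replaces A's three separate scans (one per category, each testing three startswith prefixes)
-- with a single pass that classifies each entry by its first character; same outputs everywhere.

-- ===== PORT A =====
def pvPG (p : String × Int) : Bool :=
  (PySem.Str.startswith p.1 "G1:" || PySem.Str.startswith p.1 "G2:" || PySem.Str.startswith p.1 "G3:") && (p.2 == 1)
def pvPL (p : String × Int) : Bool :=
  (PySem.Str.startswith p.1 "L1:" || PySem.Str.startswith p.1 "L2:" || PySem.Str.startswith p.1 "L3:") && (p.2 == 1)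
def pvPR (p : String × Int) : Bool :=
  (PySem.Str.startswith p.1 "R1:" || PySem.Str.startswith p.1 "R2:" || PySem.Str.startswith p.1 "R3:") && (p.2 == 1)

def generate_timeline_label (glr_results : List (String × Int)) : String :=
  if glr_results.isEmpty then "无欺诈" else
  let g_count := glr_results.countP pvPG
  let l_count := glr_results.countP pvPL
  let r_count := glr_results.countP pvPR
  let total_glr := g_count + l_count + r_count
  if total_glr ≥ 2 then
    if g_count > 0 && l_count > 0 && r_count > 0 then "GLR复合型欺诈"
    else if g_count > 0 && l_count > 0 then "GL复合型欺诈"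
    else if g_count > 0 && r_count > 0 then "GR复合型欺诈"
    else if l_count > 0 && r_count > 0 then "LR复合型欺诈"
    else "单一类别多子项欺诈"
  else if total_glr = 1 then
    if g_count = 1 then "G类单一型欺诈"
    else if l_count = 1 then "L类单一型欺诈"
    else if r_count = 1 then "R类单一型欺诈"
    else "单一型欺诈"
  else "无欺诈"

-- ===== PORT B =====
-- 'len(label) >= 3 and label[1] in '123' and label[2] == ':'' ported exactly as a match on
-- the first three characters of the label (exact: a shorter string has no third character).
def pvStepChars (acc : Nat × Nat × Nat) (v : Int) : List Char → Nat × Nat × Nat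
  | c0 :: c1 :: c2 :: _ =>
    if v == 1 && (c1 == '1' || c1 == '2' || c1 == '3') && c2 == ':' then
      if c0 == 'G' then (acc.1 + 1, acc.2.1, acc.2.2)
      else if c0 == 'L' then (acc.1, acc.2.1 + 1, acc.2.2)
      else if c0 == 'R' then (acc.1, acc.2.1, acc.2.2 + 1)
      else acc
    else acc
  | _ => acc

def pvClassifyStep (acc : Nat × Nat × Nat) (p : String × Int) : Nat × Nat × Nat :=
  pvStepChars acc p.2 p.1.toList

def generate_timeline_label_alt (glr_results : List (String × Int)) : String :=
  if glr_results.isEmpty then "无欺诈" else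
  let counts := glr_results.foldl pvClassifyStep (0, 0, 0)
  let g_count := counts.1
  let l_count := counts.2.1
  let r_count := counts.2.2
  let total_glr := g_count + l_count + r_count
  if total_glr ≥ 2 then
    if g_count > 0 && l_count > 0 && r_count > 0 then "GLR复合型欺诈"
    else if g_count > 0 && l_count > 0 then "GL复合型欺诈"
    else if g_count > 0 && r_count > 0 then "GR复合型欺诈"
    else if l_count > 0 && r_count > 0 then "LR复合型欺诈"
    else "单一类别多子项欺诈"
  else if total_glr = 1 then
    if g_count = 1 then "G类单一型欺诈"
    else if l_count = 1 then "L类单一型欺诈"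
    else if r_count = 1 then "R类单一型欺诈"
    else "单一型欺诈"
  else "无欺诈"

-- ===== PRECONDITION & SPEC =====
def Spec_generate_timeline_label (glr_results : List (String × Int)) (out : String) : Prop := out = generate_timeline_label_alt glr_results
instance (glr_results : List (String × Int)) (out : String) : Decidable (Spec_generate_timeline_label glr_results out) := by unfold Spec_generate_timeline_label; infer_instance

-- ===== CLAIM (what is proved, stated in full; the proofs are below) =====
def Claim_equal_generate_timeline_label : Prop := ∀ (glr_results : List (String × Int)), Dom_generate_timeline_label glr_results → Spec_generate_timeline_label glr_results (generate_timeline_label glr_results)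

-- ===== LEMMAS AND PROOFS =====
theorem pvStep_eq (acc : Nat × Nat × Nat) (v : Int) (cs : List Char) :
    pvStepChars acc v cs =
      (acc.1 + (if (PySem.Chars.startswith cs ['G', '1', ':'] || PySem.Chars.startswith cs ['G', '2', ':'] || PySem.Chars.startswith cs ['G', '3', ':']) && v == 1 then 1 else 0),
       acc.2.1 + (if (PySem.Chars.startswith cs ['L', '1', ':'] || PySem.Chars.startswith cs ['L', '2', ':'] || PySem.Chars.startswith cs ['L', '3', ':']) && v == 1 then 1 else 0),
       acc.2.2 + (if (PySem.Chars.startswith cs ['R', '1', ':'] || PySem.Chars.startswith cs ['R', '2', ':'] || PySem.Chars.startswith cs ['R', '3', ':']) && v == 1 then 1 else 0)) := by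
  match cs with
  | [] => simp [pvStepChars, PySem.Chars.startswith]
  | [c0] => simp [pvStepChars, PySem.Chars.startswith]
  | [c0, c1] => simp [pvStepChars, PySem.Chars.startswith]
  | c0 :: c1 :: c2 :: rest =>
    by_cases h1 : v = 1 <;>
    by_cases hG : c0 = 'G' <;> by_cases hL : c0 = 'L' <;> by_cases hR : c0 = 'R' <;>
    by_cases ha : c1 = '1' <;> by_cases hb : c1 = '2' <;> by_cases hc : c1 = '3' <;>
    by_cases hd : c2 = ':' <;>
    simp_all [pvStepChars, PySem.Chars.startswith] <;> try simp_all [@eq_comm Char]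

theorem pvClassifyStep_eq (acc : Nat × Nat × Nat) (p : String × Int) :
    pvClassifyStep acc p =
      (acc.1 + (if pvPG p then 1 else 0),
       acc.2.1 + (if pvPL p then 1 else 0),
       acc.2.2 + (if pvPR p then 1 else 0)) := by
  obtain ⟨s, v⟩ := p
  simp only [pvClassifyStep, pvPG, pvPL, pvPR, PySem.Str.startswith_eq]
  rw [pvStep_eq]
  rfl

theorem pvFoldl_classify (l : List (String × Int)) (a b c : Nat) :
    l.foldl pvClassifyStep (a, b, c) =
      (a + l.countP pvPG, b + l.countP pvPL, c + l.countP pvPR) := by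
  induction l generalizing a b c with
  | nil => simp
  | cons p t ih =>
    rw [List.foldl_cons, pvClassifyStep_eq, ih]
    simp only [List.countP_cons, Prod.mk.injEq]
    refine ⟨?_, ?_, ?_⟩ <;> [by_cases h : pvPG p; by_cases h : pvPL p; by_cases h : pvPR p] <;>
      simp [h] <;> omega

theorem pvFoldl_classify₀ (l : List (String × Int)) :
    l.foldl pvClassifyStep (0, 0, 0) = (l.countP pvPG, l.countP pvPL, l.countP pvPR) := by
  rw [pvFoldl_classify]; simp

-- ===== VERDICT (by name: the statement is the Claim_ definition above) =====
theorem generate_timeline_label_spec : Claim_equal_generate_timeline_label := by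
  intro glr_results _
  unfold Spec_generate_timeline_label generate_timeline_label generate_timeline_label_alt
  rw [pvFoldl_classify₀]
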